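-- pv_equiv track=rewrite | github.com/saballeth/Filtrado-Colaborativo | main.py | procesar_intereses
-- ===== SOURCE A (Python) =====
-- def procesar_intereses(preferencias):
--     intereses_por_usuario = {}
--     for preferencia in preferencias:
--         usuario = preferencia['usuario']
--         interes = preferencia['interes']
--         if usuario not in intereses_por_usuario:
--             intereses_por_usuario[usuario] = []
--         intereses_por_usuario[usuario].append(interes)
--     return intereses_por_usuario
-- ===== SOURCE B (Python) =====
-- def procesar_intereses(preferencias):
--     # Two-pass: first the distinct users in first-appearance order,
--     # then one filtering comprehension per user.
--     usuarios = dict.fromkeys(p['usuario'] for p in preferencias)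
--     return {u: [p['interes'] for p in preferencias if p['usuario'] == u]
--             for u in usuarios}
-- ===== Notes on version B (the rewrite author's own statement) =====
-- stated objective: alternative
-- what changed: B replaces A's incremental dict-grouping loop (setdefault-and-append per record) by a two-pass strategy: one dedup pass collecting the distinct users in first-appearance order, then one filtering comprehension per user building that user's interest list.
-- outside the precondition, e.g. on procesar_intereses([{'interes': 'x'}]): A raises KeyError, B raises KeyError
import Mathlib
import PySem

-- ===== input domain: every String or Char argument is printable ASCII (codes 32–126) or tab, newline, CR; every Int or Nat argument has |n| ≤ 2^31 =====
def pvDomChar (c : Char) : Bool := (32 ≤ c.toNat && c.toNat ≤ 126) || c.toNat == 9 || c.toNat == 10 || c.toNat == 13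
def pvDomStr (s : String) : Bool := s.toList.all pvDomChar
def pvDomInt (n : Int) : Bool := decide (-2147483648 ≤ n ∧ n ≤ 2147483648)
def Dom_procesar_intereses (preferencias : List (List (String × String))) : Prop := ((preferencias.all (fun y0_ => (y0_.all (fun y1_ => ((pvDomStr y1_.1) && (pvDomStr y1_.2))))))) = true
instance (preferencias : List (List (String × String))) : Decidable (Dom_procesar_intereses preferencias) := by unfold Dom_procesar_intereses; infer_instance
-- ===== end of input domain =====

-- B groups by a dedup pass over users followed by one filter per user instead of A's
-- incremental dict building; same return value, no speed claim (objective: alternative).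

-- ===== PORT A =====
-- preferencia['usuario'] / preferencia['interes']; KeyError (missing key) is excluded by Pre_.
def pvUsuario (p : List (String × String)) : String := (PySem.Dict.mk p).getD "usuario" ""
def pvInteres (p : List (String × String)) : String := (PySem.Dict.mk p).getD "interes" ""

def procesar_intereses (preferencias : List (List (String × String))) : List (String × List String) :=
  (preferencias.foldl
    (fun d preferencia =>
      let usuario := pvUsuario preferencia
      let interes := pvInteres preferencia
      let d' := if d.contains usuario then d else d.insert usuario []
      d'.modify usuario [] (fun l => l ++ [interes]))
    (PySem.Dict.empty : PySem.Dict String (List String))).items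

-- ===== PORT B =====
def procesar_intereses_alt (preferencias : List (List (String × String))) : List (String × List String) :=
  let usuarios := PySem.List.dedup (preferencias.map (fun p => pvUsuario p))
  usuarios.map (fun u =>
    (u, ((preferencias.filter (fun p => pvUsuario p == u)).map (fun p => pvInteres p))))

-- ===== PRECONDITION & SPEC =====
-- Pre_ excludes inputs where some record lacks the 'usuario' or 'interes' key: there Python A raises KeyError.
def Pre_procesar_intereses (preferencias : List (List (String × String))) : Prop :=
  ∀ p ∈ preferencias, (PySem.Dict.mk p).contains "usuario" = true ∧ (PySem.Dict.mk p).contains "interes" = true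
instance (preferencias : List (List (String × String))) : Decidable (Pre_procesar_intereses preferencias) := by unfold Pre_procesar_intereses; infer_instance

def pvWitness_procesar_intereses : (List (List (String × String))) :=
  [[("usuario", "ana"), ("interes", "cine")],
   [("usuario", "bob"), ("interes", "rock")],
   [("usuario", "ana"), ("interes", "te")]]

def Spec_procesar_intereses (preferencias : List (List (String × String))) (out : List (String × List String)) : Prop := out = procesar_intereses_alt preferencias
instance (preferencias : List (List (String × String))) (out : List (String × List String)) : Decidable (Spec_procesar_intereses preferencias out) := by unfold Spec_procesar_intereses; infer_instance

-- ===== CLAIM (what is proved, stated in full; the proofs are below) =====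
def Claim_equal_procesar_intereses : Prop := ∀ (preferencias : List (List (String × String))), Dom_procesar_intereses preferencias → Pre_procesar_intereses preferencias → Spec_procesar_intereses preferencias (procesar_intereses preferencias)

-- ===== LEMMAS AND PROOFS =====

-- A's 'if missing then d[u]=[]; then append' step equals a single modify step.
theorem pv_step_eq (d : PySem.Dict String (List String)) (u : String) (f : List String → List String) :
    (if d.contains u then d else d.insert u []).modify u [] f = d.modify u [] f := by
  by_cases h : d.contains u = true
  · simp [h]
  · have h' : d.contains u = false := by simpa using h
    simp only [h, Bool.false_eq_true, if_false, PySem.Dict.modify,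
      PySem.Dict.getD_insert_self, PySem.Dict.insert_insert_self,
      PySem.Dict.getD_of_not_contains d [] h']

theorem procesar_intereses_spec : Claim_equal_procesar_intereses := by
  intro prefs _ _
  unfold Spec_procesar_intereses procesar_intereses procesar_intereses_alt
  have hstep : (fun (d : PySem.Dict String (List String)) preferencia =>
      let usuario := pvUsuario preferencia
      let interes := pvInteres preferencia
      let d' := if d.contains usuario then d else d.insert usuario []
      d'.modify usuario [] (fun l => l ++ [interes]))
      = (fun d p => d.modify (pvUsuario p) [] (fun l => l ++ [pvInteres p])) := by
    funext d p
    exact pv_step_eq d (pvUsuario p) (fun l => l ++ [pvInteres p])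
  rw [hstep]
  have hfold : prefs.foldl (fun d p => d.modify (pvUsuario p) [] (fun l => l ++ [pvInteres p]))
        (PySem.Dict.empty : PySem.Dict String (List String))
      = (prefs.map (fun p => (pvUsuario p, pvInteres p))).foldl
          (fun d q => d.modify q.1 [] (fun l => l ++ [q.2])) PySem.Dict.empty := by
    rw [List.foldl_map]
  rw [hfold]
  set L := prefs.map (fun p => (pvUsuario p, pvInteres p)) with hL
  set d := L.foldl (fun d q => d.modify q.1 [] (fun l => l ++ [q.2]))
      (PySem.Dict.empty : PySem.Dict String (List String)) with hd
  have hn : d.keys.Nodup := by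
    rw [hd]
    exact PySem.Dict.nodup_keys_foldl_modify_key _ _ _ _ _ (by simp)
  have hk : d.keys = PySem.Set.ofList (prefs.map (fun p => pvUsuario p)) := by
    rw [hd, PySem.Dict.keys_foldl_modify_key]
    simp [hL, List.map_map, Function.comp_def, PySem.Set.update_nil_left]
  have hget : ∀ c, d.getD c [] =
      (prefs.filter (fun p => pvUsuario p == c)).map (fun p => pvInteres p) := by
    intro c
    rw [hd, PySem.Dict.getD_foldl_modify_append]
    simp [hL, List.filter_map, Function.comp_def, List.map_map]
  rw [PySem.Dict.items_eq_map_keys d hn ([] : List String), hk]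
  simp only [PySem.List.dedup_eq_ofList, hget]
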